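-- pv_equiv track=rewrite | github.com/DT0712/AnNinhMang | ctf_challenges/crypto20_stego/generate_stego.py | text_to_bits
-- ===== SOURCE A (Python) =====
-- def text_to_bits(text):
--     b = text.encode("utf-8")
--     bits = []
--     for byte in b:
--         for i in range(8):
--             bits.append((byte >> (7 - i)) & 1)
--     bits += [0]*8  # terminator
--     return bits
-- ===== SOURCE B (Python) =====
-- def text_to_bits(text):
--     # build the result back-to-front: terminator first, then the bytes in reverse,
--     # each byte emitted LSB-first by repeated (& 1, >>= 1); one final reverse.
--     out = [0] * 8
--     for byte in reversed(text.encode("utf-8")):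
--         for _ in range(8):
--             out.append(byte & 1)
--             byte >>= 1
--     out.reverse()
--     return out
-- ===== Notes on version B (the rewrite author's own statement) =====
-- stated objective: alternative
-- what changed: B builds the bit list back-to-front: terminator first, then it iterates the bytes in reverse, emitting each byte least-significant-bit first by repeatedly masking the low bit and shifting the byte right in place, and reverses the list once at the end, instead of A's forward MSB-first nested loops with per-bit shift amounts.
import Mathlib
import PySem

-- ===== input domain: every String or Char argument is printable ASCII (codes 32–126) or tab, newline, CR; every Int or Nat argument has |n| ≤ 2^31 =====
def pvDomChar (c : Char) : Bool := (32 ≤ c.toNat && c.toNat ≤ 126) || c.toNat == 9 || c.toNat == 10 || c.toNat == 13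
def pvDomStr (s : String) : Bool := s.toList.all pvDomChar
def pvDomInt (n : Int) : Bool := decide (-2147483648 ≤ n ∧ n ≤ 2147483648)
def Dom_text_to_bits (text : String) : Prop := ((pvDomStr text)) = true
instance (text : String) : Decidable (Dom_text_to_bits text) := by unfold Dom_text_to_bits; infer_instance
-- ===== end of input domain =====

-- B builds the bit list back-to-front (terminator first, bytes reversed, each byte emitted
-- LSB-first by '& 1' / '>>= 1') and reverses once at the end (objective: alternative).
-- On Dom (ASCII incl. tab/newline/CR) 'text.encode("utf-8")' is one byte per char = its code.

-- ===== PORT A =====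
-- literal port of A: for each byte, for i in range(8): bits.append((byte >> (7-i)) & 1); then += [0]*8
def text_to_bits (text : String) : List Int :=
  let bits : List Int :=
    text.toList.foldl (fun bits byte =>
      (List.range 8).foldl (fun bits i =>
        bits ++ [(((byte.toNat >>> (7 - i)) &&& 1 : Nat) : Int)]) bits) []
  bits ++ List.replicate 8 (0 : Int)

-- ===== PORT B =====
-- literal port of B: out = [0]*8; for byte in reversed(bytes): 8 x (append byte & 1; byte >>= 1); out.reverse()
def text_to_bits_alt (text : String) : List Int :=
  let out : List Int := List.replicate 8 (0 : Int)
  let out := (text.toList.map Char.toNat).reverse.foldl (fun out byte =>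
    ((List.range 8).foldl (fun (s : Nat × List Int) _ =>
      (s.1 >>> 1, s.2 ++ [((s.1 &&& 1 : Nat) : Int)])) (byte, out)).2) out
  out.reverse

-- ===== PRECONDITION & SPEC =====
def Spec_text_to_bits (text : String) (out : List Int) : Prop := out = text_to_bits_alt text
instance (text : String) (out : List Int) : Decidable (Spec_text_to_bits text out) := by unfold Spec_text_to_bits; infer_instance

-- ===== CLAIM (what is proved, stated in full; the proofs are below) =====
def Claim_equal_text_to_bits : Prop := ∀ (text : String), Dom_text_to_bits text → Spec_text_to_bits text (text_to_bits text)

-- ===== LEMMAS AND PROOFS =====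

-- the 8 MSB-first bits of one byte, as A's inner loop produces them
def bitsOfByte (b : Nat) : List Int :=
  (List.range 8).map (fun i => (((b >>> (7 - i)) &&& 1 : Nat) : Int))

theorem text_to_bits_eq_flatMap (text : String) :
    text_to_bits text
      = (text.toList.map Char.toNat).flatMap bitsOfByte ++ List.replicate 8 (0 : Int) := by
  unfold text_to_bits
  have hstep : (fun (bits : List Int) (byte : Char) =>
      (List.range 8).foldl (fun bits i =>
        bits ++ [(((byte.toNat >>> (7 - i)) &&& 1 : Nat) : Int)]) bits)
      = fun bits byte => bits ++ bitsOfByte byte.toNat := by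
    funext bits byte
    exact PySem.List.foldl_append_singleton_eq_map ..
  rw [hstep, PySem.List.foldl_append_eq_flatMap, List.flatMap_map]
  simp

-- the 8 bits of one byte LSB-first, exactly as B's inner loop emits them
def lsbBits (b : Nat) : List Int :=
  [((b &&& 1 : Nat) : Int), (((b >>> 1) &&& 1 : Nat) : Int), (((b >>> 2) &&& 1 : Nat) : Int),
   (((b >>> 3) &&& 1 : Nat) : Int), (((b >>> 4) &&& 1 : Nat) : Int), (((b >>> 5) &&& 1 : Nat) : Int),
   (((b >>> 6) &&& 1 : Nat) : Int), (((b >>> 7) &&& 1 : Nat) : Int)]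

theorem inner_loop_eq (b : Nat) (out : List Int) :
    ((List.range 8).foldl (fun (s : Nat × List Int) _ =>
      (s.1 >>> 1, s.2 ++ [((s.1 &&& 1 : Nat) : Int)])) (b, out)).2 = out ++ lsbBits b := by
  simp [List.range_succ, lsbBits, ← Nat.shiftRight_add]

theorem reverse_lsbBits (b : Nat) : (lsbBits b).reverse = bitsOfByte b := by
  simp [lsbBits, bitsOfByte, List.range_succ]

theorem alt_eq_flatMap (text : String) :
    text_to_bits_alt text
      = (text.toList.map Char.toNat).flatMap bitsOfByte ++ List.replicate 8 (0 : Int) := by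
  unfold text_to_bits_alt
  have hstep : (fun (out : List Int) (byte : Nat) =>
      ((List.range 8).foldl (fun (s : Nat × List Int) _ =>
        (s.1 >>> 1, s.2 ++ [((s.1 &&& 1 : Nat) : Int)])) (byte, out)).2)
      = fun out byte => out ++ lsbBits byte := by
    funext out byte; exact inner_loop_eq byte out
  rw [hstep]
  simp only [PySem.List.foldl_append_eq_flatMap, List.reverse_append, List.reverse_flatMap,
    List.reverse_reverse, List.reverse_replicate, Function.comp_def, reverse_lsbBits]

-- ===== VERDICT (by name: the statement is the Claim_ definition above) =====
theorem text_to_bits_spec : Claim_equal_text_to_bits := by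
  intro text _
  show text_to_bits text = text_to_bits_alt text
  rw [text_to_bits_eq_flatMap, alt_eq_flatMap]
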